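-- pv_equiv track=rewrite | github.com/xufangzhi/TaCo | tokenization.py | get_node_tag
-- ===== SOURCE A (Python) =====
-- def get_node_tag(bpe_tokens):
--     i = 0
--     mask_tag, tag_now = 0, 0
--     cond_tag, res_tag = 1, 2
--     node_tag = []
--     while i < len(bpe_tokens):
--         if bpe_tokens[i] == "<cond>" or bpe_tokens[i] == "<mask>" or bpe_tokens[i] == "<unk>":
--             tag_now += 1
--             # node_tag.append(tag_now)
--             if bpe_tokens[i] == "<mask>":
--                 node_tag.append(cond_tag)
--             else:
--                 node_tag.append(res_tag)
--             bpe_tokens.pop(i)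
--             i += 1
--         elif bpe_tokens[i] == "</cond>" or bpe_tokens[i] == "</s>":
--             bpe_tokens.pop(i)
--         else:
--             node_tag.append(mask_tag)
--             i += 1
--     return bpe_tokens, node_tag
-- ===== SOURCE B (Python) =====
-- def get_node_tag(bpe_tokens):
--     # Single forward pass building output lists instead of repeated in-place pop(i).
--     # A pop of an opening special token followed by i += 1 leaves the
--     # following token in the list untagged; the skip flag replicates that.
--     kept, tags = [], []
--     skip = False
--     for tok in bpe_tokens:
--         if skip:
--             kept.append(tok)
--             skip = False
--         elif tok in ("<cond>", "<mask>", "<unk>"):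
--             tags.append(1 if tok == "<mask>" else 2)
--             skip = True
--         elif tok in ("</cond>", "</s>"):
--             pass
--         else:
--             kept.append(tok)
--             tags.append(0)
--     bpe_tokens[:] = kept  # A mutates its argument in place; do the same
--     return bpe_tokens, tags
-- ===== Notes on version B (the rewrite author's own statement) =====
-- stated objective: alternative
-- what changed: Replaced the while-loop that repeatedly calls list.pop(i) (shifting the tail on every special token) by a single forward pass with a skip flag that builds the kept-token and tag lists and assigns them back with one slice operation.
import Mathlib
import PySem

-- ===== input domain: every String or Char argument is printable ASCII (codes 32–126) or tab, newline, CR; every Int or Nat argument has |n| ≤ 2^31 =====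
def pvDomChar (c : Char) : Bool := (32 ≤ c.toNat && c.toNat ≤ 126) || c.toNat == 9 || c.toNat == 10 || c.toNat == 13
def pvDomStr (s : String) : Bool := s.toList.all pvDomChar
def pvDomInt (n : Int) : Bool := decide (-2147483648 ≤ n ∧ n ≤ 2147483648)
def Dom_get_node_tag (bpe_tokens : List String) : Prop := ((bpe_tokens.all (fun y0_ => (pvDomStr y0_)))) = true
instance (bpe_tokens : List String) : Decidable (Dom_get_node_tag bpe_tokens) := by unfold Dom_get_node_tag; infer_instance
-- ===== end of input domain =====

-- B replaces A's while-loop with in-place pop(i) by one forward pass with a skip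
-- flag that builds the output lists. Both mutate the argument list in Python;
-- equivalence here is about the returned pair.

-- ===== PORT A =====
-- A's while-loop: state is the (mutated) token list, the index i, the unused
-- counter tag_now, and the node_tag accumulator.  list.pop(i) → List.eraseIdx i.
def getNodeTagGo (toks : List String) (i : Nat) (tagNow : Int) (tags : List Int) :
    List String × List Int :=
  if h : i < toks.length then
    if toks[i] == "<cond>" || toks[i] == "<mask>" || toks[i] == "<unk>" then
      getNodeTagGo (toks.eraseIdx i) (i + 1) (tagNow + 1)
        (tags ++ [if toks[i] == "<mask>" then (1 : Int) else (2 : Int)])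
    else if toks[i] == "</cond>" || toks[i] == "</s>" then
      getNodeTagGo (toks.eraseIdx i) i tagNow tags
    else
      getNodeTagGo toks (i + 1) tagNow (tags ++ [(0 : Int)])
  else
    (toks, tags)
termination_by toks.length - i
decreasing_by
  · simp [List.length_eraseIdx, h]; omega
  · simp [List.length_eraseIdx, h]; omega
  · omega

def get_node_tag (bpe_tokens : List String) : List String × List Int :=
  getNodeTagGo bpe_tokens 0 0 []

-- ===== PORT B =====
-- B's loop body: state (kept, tags, skip), one step per input token.
def nodeTagStep (st : List String × List Int × Bool) (tok : String) :
    List String × List Int × Bool :=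
  let (kept, tags, skip) := st
  if skip then (kept ++ [tok], tags, false)
  else if tok == "<cond>" || tok == "<mask>" || tok == "<unk>" then
    (kept, tags ++ [if tok == "<mask>" then (1 : Int) else (2 : Int)], true)
  else if tok == "</cond>" || tok == "</s>" then (kept, tags, false)
  else (kept ++ [tok], tags ++ [(0 : Int)], false)

def get_node_tag_alt (bpe_tokens : List String) : List String × List Int :=
  let st := bpe_tokens.foldl nodeTagStep ([], [], false)
  (st.1, st.2.1)

-- ===== PRECONDITION & SPEC =====
def Spec_get_node_tag (bpe_tokens : List String) (out : List String × List Int) : Prop := out = get_node_tag_alt bpe_tokens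
instance (bpe_tokens : List String) (out : List String × List Int) : Decidable (Spec_get_node_tag bpe_tokens out) := by unfold Spec_get_node_tag; infer_instance

-- ===== CLAIM (what is proved, stated in full; the proofs are below) =====
def Claim_equal_get_node_tag : Prop := ∀ (bpe_tokens : List String), Dom_get_node_tag bpe_tokens → Spec_get_node_tag bpe_tokens (get_node_tag bpe_tokens)

-- ===== LEMMAS AND PROOFS =====

-- Past the end of the list, A's loop stops.
theorem getNodeTagGo_stop (toks : List String) (i : Nat) (tagNow : Int)
    (tags : List Int) (h : toks.length ≤ i) :
    getNodeTagGo toks i tagNow tags = (toks, tags) := by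
  unfold getNodeTagGo
  simp [Nat.not_lt.mpr h]

-- Invariant: with processed prefix P in place and the cursor at |P|, A's loop
-- on P ++ R computes what B's fold computes over R from state (P, tags, false).
theorem getNodeTagGo_eq_fold (R P : List String) (tagNow : Int) (tags : List Int) :
    getNodeTagGo (P ++ R) P.length tagNow tags =
      ((R.foldl nodeTagStep (P, tags, false)).1,
       (R.foldl nodeTagStep (P, tags, false)).2.1) := by
  match R with
  | [] =>
      simp [getNodeTagGo_stop]
  | t :: rest =>
      have hget : (P ++ t :: rest)[P.length]'(by simp) = t := by
        simp
      have herase : (P ++ t :: rest).eraseIdx P.length = P ++ rest := by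
        rw [List.eraseIdx_append_of_length_le (le_refl _)]
        simp
      by_cases hopen : (t == "<cond>" || t == "<mask>" || t == "<unk>") = true
      · -- opening special token: pop it, tag it, skip the next token
        rw [getNodeTagGo]
        simp only [hget, herase, hopen, dif_pos (show P.length < (P ++ t :: rest).length by simp)]
        match rest with
        | [] =>
            rw [getNodeTagGo_stop _ _ _ _ (by simp)]
            simp [List.foldl, nodeTagStep, hopen]
        | u :: rest' =>
            have h1 : P ++ u :: rest' = (P ++ [u]) ++ rest' := by simp
            have h2 : P.length + 1 = (P ++ [u]).length := by simp
            rw [h1, h2, getNodeTagGo_eq_fold rest' (P ++ [u])]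
            simp [List.foldl, nodeTagStep, hopen]
      · by_cases hclose : (t == "</cond>" || t == "</s>") = true
        · rw [getNodeTagGo]
          simp only [hget, herase, hopen, hclose,
            dif_pos (show P.length < (P ++ t :: rest).length by simp),
            Bool.false_eq_true, if_false]
          rw [getNodeTagGo_eq_fold rest P]
          simp [List.foldl, nodeTagStep, hopen, hclose]
        · rw [getNodeTagGo]
          simp only [hget, hopen, hclose,
            dif_pos (show P.length < (P ++ t :: rest).length by simp),
            Bool.false_eq_true, if_false]
          have h1 : P ++ t :: rest = (P ++ [t]) ++ rest := by simp
          have h2 : P.length + 1 = (P ++ [t]).length := by simp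
          rw [h1, h2, getNodeTagGo_eq_fold rest (P ++ [t])]
          simp [List.foldl, nodeTagStep, hopen, hclose]
termination_by R.length
decreasing_by
  all_goals simp

-- ===== VERDICT (by name: the statement is the Claim_ definition above) =====
theorem get_node_tag_spec : Claim_equal_get_node_tag := by
  intro bpe _
  show get_node_tag bpe = get_node_tag_alt bpe
  have := getNodeTagGo_eq_fold bpe [] 0 []
  simpa [get_node_tag, get_node_tag_alt] using this
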